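-- pv_equiv track=rewrite | github.com/pgrady1322/strandweaver | strandweaver/training/scripts/generate_errorsmith_training_data.py | _find_homopolymers
-- ===== SOURCE A (Python) =====
-- from typing import Any, Dict, Generator, List, Optional, Set, Tuple
--
-- def _find_homopolymers(seq: str, min_len: int = 3) -> Dict[int, Tuple[str, int]]:
--     """
--     Index homopolymer runs in a sequence.
--
--     Returns:
--         {position: (base, hp_length)} for every position within a homopolymer.
--     """
--     hp_index = {}
--     i = 0
--     while i < len(seq):
--         base = seq[i].upper()
--         if base not in 'ACGT':
--             i += 1
--             continue
--         j = i + 1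
--         while j < len(seq) and seq[j].upper() == base:
--             j += 1
--         hp_len = j - i
--         if hp_len >= min_len:
--             for pos in range(i, j):
--                 hp_index[pos] = (base, hp_len)
--         i = j
--     return hp_index
-- ===== SOURCE B (Python) =====
-- def _find_homopolymers(seq: str, min_len: int = 3):
--     """Per-position run-length DP: compute, for every position, the run length
--     ending there (left pass) and starting there (right pass); the maximal run
--     through position i has length left[i] + right[i] - 1."""
--     u = seq.upper()
--     n = len(u)
--     right = [1] * n
--     for i in range(n - 2, -1, -1):
--         if u[i] == u[i + 1]:
--             right[i] = right[i + 1] + 1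
--     left = [1] * n
--     for i in range(1, n):
--         if u[i] == u[i - 1]:
--             left[i] = left[i - 1] + 1
--     return {i: (b, L + R - 1)
--             for i, (b, L, R) in enumerate(zip(u, left, right))
--             if b in 'ACGT' and L + R - 1 >= min_len}
-- ===== Notes on version B (the rewrite author's own statement) =====
-- stated objective: alternative
-- what changed: A's run-segmentation scan (nested while loops locating each maximal run and stamping it) is replaced by a per-position run-length DP: a backward pass computes the run length starting at each position, a forward pass the run length ending there, and a final comprehension emits (base, left+right-1) per qualifying position.
import Mathlib
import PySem

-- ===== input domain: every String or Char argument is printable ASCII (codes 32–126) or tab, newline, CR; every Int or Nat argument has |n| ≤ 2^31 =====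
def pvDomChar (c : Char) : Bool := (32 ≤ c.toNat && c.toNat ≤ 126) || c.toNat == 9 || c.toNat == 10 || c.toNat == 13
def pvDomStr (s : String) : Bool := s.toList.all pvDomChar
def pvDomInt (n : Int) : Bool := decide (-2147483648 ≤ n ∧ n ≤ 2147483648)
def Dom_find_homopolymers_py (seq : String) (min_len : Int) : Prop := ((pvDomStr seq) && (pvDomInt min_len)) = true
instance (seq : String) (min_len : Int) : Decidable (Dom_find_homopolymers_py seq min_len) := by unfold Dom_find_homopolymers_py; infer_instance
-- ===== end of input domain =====

-- B replaces A's run-segmentation scan (nested while loops finding each maximal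
-- run) by a per-position run-length DP: two staged passes compute, for every
-- position, the run length ending there and starting there (alternative).

-- ===== PORT A =====
-- inner 'while j < len(seq) and seq[j].upper() == base: j += 1' — count of leading chars whose upper() is base
def aRun (base : Char) : List Char → Nat
  | [] => 0
  | c :: rest => if PySem.Chars.upperChar c == base then aRun base rest + 1 else 0

-- outer 'while i < len(seq)' loop.  Dict keys written are fresh and strictly
-- increasing, so each dict write is an append to the insertion-order assoc list.
def aLoop (min_len : Int) : List Char → Int → List (Int × String × Int)
  | [], _ => []
  | c :: rest, i =>
    let base := PySem.Chars.upperChar c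
    if base == 'A' || base == 'C' || base == 'G' || base == 'T' then
      let k := aRun base rest
      let hpLen : Int := (k : Int) + 1
      (if min_len ≤ hpLen then
        (PySem.List.pyRange i (i + hpLen) 1).map (fun p => (p, String.singleton base, hpLen))
       else [])
        ++ aLoop min_len (rest.drop k) (i + hpLen)
    else
      aLoop min_len rest (i + 1)
  termination_by l _ => l.length
  decreasing_by
    · simp [List.length_drop]
    · simp

def find_homopolymers_py (seq : String) (min_len : Int) : List (Int × String × Int) :=
  aLoop min_len seq.toList 0

-- ===== PORT B =====
-- backward pass: right[i] = run length starting at i  ('if u[i] == u[i+1]: right[i] = right[i+1] + 1')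
def rightRuns : List Char → List Nat
  | [] => []
  | [_] => [1]
  | c :: d :: rest =>
    let r := rightRuns (d :: rest)
    (if c == d then r.head! + 1 else 1) :: r

-- forward pass: left[i] = run length ending at i, carrying the previous char and its count
def leftAux (prev : Char) (cnt : Nat) : List Char → List Nat
  | [] => []
  | c :: rest =>
    let n := if c == prev then cnt + 1 else 1
    n :: leftAux c n rest

def leftRuns : List Char → List Nat
  | [] => []
  | c :: rest => 1 :: leftAux c 1 rest

-- the final dict comprehension over enumerate(zip(u, left, right)), carrying the index
def bEmit (m : Int) : List (Char × Nat × Nat) → Int → List (Int × String × Int)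
  | [], _ => []
  | (b, L, R) :: t, i =>
    (if (b == 'A' || b == 'C' || b == 'G' || b == 'T') && m ≤ ((L + R - 1 : Nat) : Int) then
       [(i, String.singleton b, ((L + R - 1 : Nat) : Int))]
     else [])
      ++ bEmit m t (i + 1)

def find_homopolymers_py_alt (seq : String) (min_len : Int) : List (Int × String × Int) :=
  bEmit min_len ((seq.toList.map PySem.Chars.upperChar).zip
    ((leftRuns (seq.toList.map PySem.Chars.upperChar)).zip
      (rightRuns (seq.toList.map PySem.Chars.upperChar)))) 0

-- ===== PRECONDITION & SPEC =====
def Spec_find_homopolymers_py (seq : String) (min_len : Int) (out : List (Int × String × Int)) : Prop := out = find_homopolymers_py_alt seq min_len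
instance (seq : String) (min_len : Int) (out : List (Int × String × Int)) : Decidable (Spec_find_homopolymers_py seq min_len out) := by unfold Spec_find_homopolymers_py; infer_instance

-- ===== CLAIM (what is proved, stated in full; the proofs are below) =====
def Claim_equal_find_homopolymers_py : Prop := ∀ (seq : String) (min_len : Int), Dom_find_homopolymers_py seq min_len → Spec_find_homopolymers_py seq min_len (find_homopolymers_py seq min_len)

-- ===== LEMMAS AND PROOFS =====

-- proof-only helpers: [s, s+1, …, s+n-1] and [n, n-1, …, 1]
def iotaFrom (s : Nat) : Nat → List Nat
  | 0 => []
  | n + 1 => s :: iotaFrom (s + 1) n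

def descTo : Nat → List Nat
  | 0 => []
  | n + 1 => (n + 1) :: descTo n

theorem iotaFrom_length (s n : Nat) : (iotaFrom s n).length = n := by
  induction n generalizing s with
  | zero => rfl
  | succ n ih => simp [iotaFrom, ih]

theorem descTo_length (n : Nat) : (descTo n).length = n := by
  induction n with
  | zero => rfl
  | succ n ih => simp [descTo, ih]

-- A's inner while counts exactly the leading run of the uppercased list
theorem aRun_eq_takeWhile (b : Char) (l : List Char) :
    aRun b l = ((l.map PySem.Chars.upperChar).takeWhile (· == b)).length := by
  induction l with
  | nil => simp [aRun]
  | cons c rest ih =>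
    simp only [aRun, List.map_cons, List.takeWhile]
    by_cases h : PySem.Chars.upperChar c == b
    · simp [h, ih]
    · simp [h]

theorem bEmit_append (m : Int) (xs ys : List (Char × Nat × Nat)) : ∀ (i : Int),
    bEmit m (xs ++ ys) i = bEmit m xs i ++ bEmit m ys (i + xs.length) := by
  induction xs with
  | nil => intro i; simp [bEmit]
  | cons h t ih =>
    intro i
    obtain ⟨b, L, R⟩ := h
    have hpos : i + 1 + (t.length : Int) = i + ((t.length + 1 : Nat) : Int) := by push_cast; ring
    simp only [List.cons_append, bEmit, ih, List.length_cons, List.append_assoc, hpos]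

theorem leftAux_replicate (b : Char) (k : Nat) : ∀ (a : Nat) (u' : List Char),
    leftAux b a (List.replicate k b ++ u') = iotaFrom (a + 1) k ++ leftAux b (a + k) u' := by
  induction k with
  | zero => intro a u'; simp [iotaFrom]
  | succ k ih =>
    intro a u'
    simp only [List.replicate_succ, List.cons_append, leftAux, beq_self_eq_true, if_true, iotaFrom,
      ih (a + 1) u']
    have h1 : a + 1 + k = a + (k + 1) := by omega
    rw [h1]

theorem rightRuns_two (c d : Char) (rest : List Char) :
    rightRuns (c :: d :: rest) =
      (if c == d then (rightRuns (d :: rest)).head! + 1 else 1) :: rightRuns (d :: rest) := rfl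

theorem rightRuns_one (c : Char) : rightRuns [c] = [1] := rfl

theorem descTo_head (k : Nat) (t : List Nat) : ((descTo (k + 1) ++ t).head!) = k + 1 := by
  simp [descTo]

theorem rightRuns_replicate (b : Char) (k : Nat) (u' : List Char)
    (h : u'.head? ≠ some b) :
    rightRuns (List.replicate k b ++ u') = descTo k ++ rightRuns u' := by
  induction k with
  | zero => simp [descTo]
  | succ k ih =>
    cases k with
    | zero =>
      cases u' with
      | nil => simp [rightRuns_one, descTo, show rightRuns ([] : List Char) = [] from rfl]
      | cons d t =>
        have hd : (b == d) = false := by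
          simp only [List.head?_cons, ne_eq, Option.some.injEq] at h
          simp [beq_eq_false_iff_ne]
          intro hbd; exact h hbd.symm
        simp [rightRuns_two, hd, descTo]
    | succ k' =>
      have hrep : List.replicate (k' + 1 + 1) b ++ u' = b :: (List.replicate (k' + 1) b ++ u') := by
        simp [List.replicate_succ]
      have hrep2 : List.replicate (k' + 1) b ++ u' = b :: (List.replicate k' b ++ u') := by
        simp [List.replicate_succ]
      rw [hrep, hrep2, rightRuns_two, ← hrep2, ih]
      simp only [beq_self_eq_true, if_true, descTo_head]
      simp [descTo]

-- bEmit over a full run segment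
theorem bEmit_seg (m : Int) (b : Char) : ∀ (d a : Nat) (i : Int),
    bEmit m ((List.replicate d b).zip ((iotaFrom (a + 1) d).zip (descTo d))) i =
      if (b == 'A' || b == 'C' || b == 'G' || b == 'T') && m ≤ ((a + d : Nat) : Int) then
        (PySem.List.pyRange i (i + (d : Int)) 1).map
          (fun p => (p, String.singleton b, ((a + d : Nat) : Int)))
      else [] := by
  intro d
  induction d with
  | zero =>
    intro a i
    simp [iotaFrom, descTo, bEmit]
  | succ d ih =>
    intro a i
    have hL : (a + 1) + (d + 1) - 1 = a + (d + 1) := by omega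
    have hcond : (a + 1) + d = a + (d + 1) := by omega
    have hrange : PySem.List.pyRange i (i + ((d + 1 : Nat) : Int)) 1
        = i :: PySem.List.pyRange (i + 1) (i + ((d + 1 : Nat) : Int)) 1 := by
      apply PySem.List.pyRange_one_cons
      push_cast; omega
    have hend : i + 1 + (d : Int) = i + ((d + 1 : Nat) : Int) := by push_cast; ring
    simp only [List.replicate_succ, iotaFrom, descTo, List.zip_cons_cons, bEmit, hL,
      ih (a + 1) (i + 1), hcond, hend, hrange]
    by_cases hc : ((((b = 'A' ∨ b = 'C') ∨ b = 'G') ∨ b = 'T') ∧ m ≤ (a : Int) + ((d : Int) + 1))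
    · simp [hc]
    · simp [hc]

theorem head?_dropWhile_false (p : Char → Bool) (l : List Char) :
    ∀ x, (l.dropWhile p).head? = some x → p x = false := by
  induction l with
  | nil => simp
  | cons c t ih =>
    intro x hx
    by_cases hp : p c
    · rw [List.dropWhile_cons_of_pos hp] at hx
      exact ih x hx
    · rw [List.dropWhile_cons_of_neg hp] at hx
      simp only [List.head?_cons, Option.some.injEq] at hx
      subst hx
      simpa using hp

theorem aLoop_eq_bEmit (m : Int) (n : Nat) : ∀ (l : List Char), l.length ≤ n →
    ∀ (prev : Char) (cnt : Nat) (i : Int),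
    ((prev == 'A' || prev == 'C' || prev == 'G' || prev == 'T') = false ∨
      (l.map PySem.Chars.upperChar).head? ≠ some prev) →
    aLoop m l i =
      bEmit m ((l.map PySem.Chars.upperChar).zip
        ((leftAux prev cnt (l.map PySem.Chars.upperChar)).zip
          (rightRuns (l.map PySem.Chars.upperChar)))) i := by
  induction n with
  | zero =>
    intro l hl prev cnt i _
    rw [List.length_eq_zero_iff.mp (Nat.le_zero.mp hl)]
    simp [aLoop, leftAux, bEmit]
  | succ n IH =>
    intro l hl prev cnt i hprev
    cases l with
    | nil => simp [aLoop, leftAux, bEmit]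
    | cons c rest =>
      set b := PySem.Chars.upperChar c with hb
      by_cases hv : (b == 'A' || b == 'C' || b == 'G' || b == 'T') = true
      · -- valid base: a whole maximal run
        have hbp : (b == prev) = false := by
          rcases hprev with hp | hp
          · by_contra hne
            simp only [Bool.not_eq_false, beq_iff_eq] at hne
            rw [hne] at hv
            rw [hv] at hp
            exact absurd hp (by simp)
          · refine beq_eq_false_iff_ne.mpr ?_
            intro hbe
            exact hp (by simp [List.map_cons, ← hb, hbe])
        set rest' := rest.map PySem.Chars.upperChar with hrest'
        set k := aRun b rest with hkdef
        set w := rest'.dropWhile (· == b) with hwdef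
        have hktw : k = (rest'.takeWhile (· == b)).length := aRun_eq_takeWhile b rest
        have htake : rest'.takeWhile (· == b) = List.replicate k b := by
          rw [List.eq_replicate_iff]
          refine ⟨hktw.symm, fun x hx => ?_⟩
          have := List.mem_takeWhile_imp hx
          simpa using this
        have hsplit : rest' = List.replicate k b ++ w := by
          rw [hwdef, ← htake, List.takeWhile_append_dropWhile]
        have hdrop : rest'.drop k = w := by
          rw [hsplit]
          simp
        have hmapdrop : (rest.drop k).map PySem.Chars.upperChar = w := by
          rw [List.map_drop, ← hrest', hdrop]
        have hwhead : w.head? ≠ some b := by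
          intro hx
          have := head?_dropWhile_false (· == b) rest' b (by rw [← hwdef]; exact hx)
          simp at this
        have hmap : (c :: rest).map PySem.Chars.upperChar = List.replicate (k + 1) b ++ w := by
          simp only [List.map_cons, ← hrest', hsplit, List.replicate_succ, List.cons_append, ← hb]
        have hleft : leftAux prev cnt (List.replicate (k + 1) b ++ w)
            = iotaFrom 1 (k + 1) ++ leftAux b (k + 1) w := by
          rw [List.replicate_succ, List.cons_append]
          simp only [leftAux, hbp, Bool.false_eq_true, if_false, leftAux_replicate b k 1 w,
            iotaFrom, List.cons_append]
          rw [Nat.add_comm 1 k]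
        have hright : rightRuns (List.replicate (k + 1) b ++ w) = descTo (k + 1) ++ rightRuns w :=
          rightRuns_replicate b (k + 1) w hwhead
        have hzip : (List.replicate (k + 1) b ++ w).zip
              ((iotaFrom 1 (k + 1) ++ leftAux b (k + 1) w).zip (descTo (k + 1) ++ rightRuns w))
            = (List.replicate (k + 1) b).zip ((iotaFrom 1 (k + 1)).zip (descTo (k + 1)))
              ++ w.zip ((leftAux b (k + 1) w).zip (rightRuns w)) := by
          rw [List.zip_append (by simp [iotaFrom_length, descTo_length]),
              List.zip_append (by simp [iotaFrom_length, descTo_length])]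
        have hseglen : (((List.replicate (k + 1) b).zip
            ((iotaFrom 1 (k + 1)).zip (descTo (k + 1)))).length : Int) = (k : Int) + 1 := by
          simp [iotaFrom_length, descTo_length]
        have hA : aLoop m (c :: rest) i =
            (if m ≤ (k : Int) + 1 then
              (PySem.List.pyRange i (i + ((k : Int) + 1)) 1).map
                (fun p => (p, String.singleton b, (k : Int) + 1))
             else [])
            ++ aLoop m (rest.drop k) (i + ((k : Int) + 1)) := by
          simp only [aLoop]
          rw [if_pos hv]
        have hlen : (rest.drop k).length ≤ n := by
          simp only [List.length_drop]
          simp only [List.length_cons] at hl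
          omega
        have hIH := IH (rest.drop k) hlen b (k + 1) (i + ((k : Int) + 1))
          (Or.inr (by rw [hmapdrop]; exact hwhead))
        rw [hmapdrop] at hIH
        rw [hA, hIH, hmap, hleft, hright, hzip, bEmit_append, hseglen,
          bEmit_seg m b (k + 1) 0 i]
        by_cases hm : m ≤ (k : Int) + 1
        · simp [hv, hm]
        · simp [hv, hm]
      · -- invalid char: step one position
        have hA : aLoop m (c :: rest) i = aLoop m rest (i + 1) := by
          simp only [aLoop]; rw [if_neg hv]
        have hIH := IH rest (by simp only [List.length_cons] at hl; omega) b
          (if b == prev then cnt + 1 else 1) (i + 1) (Or.inl (by simpa using hv))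
        rw [hA, hIH]
        cases hrest : rest.map PySem.Chars.upperChar with
        | nil => simp [leftAux, bEmit, ← hb, hrest, hv, rightRuns_one]
        | cons u t =>
          simp only [List.map_cons, ← hb, leftAux, hrest]
          rw [show rightRuns (b :: u :: t) = (if b == u then (rightRuns (u :: t)).head! + 1 else 1)
              :: rightRuns (u :: t) from rightRuns_two b u t]
          simp only [List.zip_cons_cons, bEmit, hv]
          simp

-- ===== VERDICT (by name: the statement is the Claim_ definition above) =====
theorem find_homopolymers_py_spec : Claim_equal_find_homopolymers_py := by
  intro seq min_len _
  unfold Spec_find_homopolymers_py find_homopolymers_py find_homopolymers_py_alt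
  cases hl : seq.toList with
  | nil => simp [aLoop, leftRuns, bEmit]
  | cons c rest =>
    have hv : leftRuns ((c :: rest).map PySem.Chars.upperChar)
        = leftAux (if PySem.Chars.upperChar c = '?' then '!' else '?') 1
            ((c :: rest).map PySem.Chars.upperChar) := by
      by_cases h : PySem.Chars.upperChar c = '?' <;>
        simp [leftRuns, leftAux, h]
    rw [hv]
    apply aLoop_eq_bEmit min_len (c :: rest).length _ le_rfl
    right
    by_cases h : PySem.Chars.upperChar c = '?' <;> simp [h]
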